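-- pv_equiv track=rewrite | github.com/Nicolalalas/ds410fall2025 | mrjoin/q3/q3.py | reducer_step1
-- ===== SOURCE A (Python) =====
-- def reducer_step1(invoice_no, rows):
--     total = 0
--     country = ""
--     customer_id = ""
--     for cty, cid, q in rows:
--         country = cty
--         customer_id = cid
--         total += q
--     yield country, (customer_id, total)
-- ===== SOURCE B (Python) =====
-- def _combine(x, y):
--     # merging two aggregated halves: right half's (country, customer) wins, totals add
--     return (y[0], y[1], x[2] + y[2])
--
-- def _agg(rs):
--     if not rs:
--         return ("", "", 0)
--     if len(rs) == 1:
--         return rs[0]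
--     mid = len(rs) // 2
--     return _combine(_agg(rs[:mid]), _agg(rs[mid:]))
--
-- def reducer_step1(invoice_no, rows):
--     country, customer_id, total = _agg(list(rows))
--     yield country, (customer_id, total)
-- ===== Notes on version B (the rewrite author's own statement) =====
-- stated objective: alternative
-- what changed: Replaces A's single left-to-right accumulator loop with a divide-and-conquer monoid reduction: rows are split in halves, each half aggregated recursively, and halves merged by adding totals and taking the right half's country/customer.
import Mathlib
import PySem

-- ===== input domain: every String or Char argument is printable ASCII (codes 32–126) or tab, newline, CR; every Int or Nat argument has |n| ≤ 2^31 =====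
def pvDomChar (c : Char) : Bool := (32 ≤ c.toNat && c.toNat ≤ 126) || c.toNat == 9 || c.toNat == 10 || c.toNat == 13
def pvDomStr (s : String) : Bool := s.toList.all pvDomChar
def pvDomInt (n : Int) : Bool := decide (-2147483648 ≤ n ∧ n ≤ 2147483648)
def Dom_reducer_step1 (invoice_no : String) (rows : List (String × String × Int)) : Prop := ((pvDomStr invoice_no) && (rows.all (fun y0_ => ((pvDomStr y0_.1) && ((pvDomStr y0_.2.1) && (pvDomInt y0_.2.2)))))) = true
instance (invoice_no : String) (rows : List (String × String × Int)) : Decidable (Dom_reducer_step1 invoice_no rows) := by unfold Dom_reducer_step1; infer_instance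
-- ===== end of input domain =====

-- B replaces A's single accumulator loop by a divide-and-conquer monoid reduction; return-value equivalence.
-- ===== PORT A =====
-- A: one loop over rows threading (country, customer_id, total); yield one pair.
def reducer_step1 (invoice_no : String) (rows : List (String × String × Int)) : List (String × (String × Int)) :=
  let st := rows.foldl (fun (acc : String × String × Int) r =>
    (r.1, r.2.1, acc.2.2 + r.2.2)) ("", "", 0)
  [(st.1, (st.2.1, st.2.2))]

-- ===== PORT B =====
-- B helper: merge two aggregated halves (right wins country/customer, totals add)
def pvCombine (x y : String × String × Int) : String × String × Int :=
  (y.1, y.2.1, x.2.2 + y.2.2)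

-- B helper: divide-and-conquer aggregation of the rows
def pvAgg : List (String × String × Int) → String × String × Int
  | [] => ("", "", 0)
  | [r] => r
  | a :: b :: tl =>
    let mid := (a :: b :: tl).length / 2
    pvCombine (pvAgg ((a :: b :: tl).take mid)) (pvAgg ((a :: b :: tl).drop mid))
termination_by rs => rs.length
decreasing_by
  · simp [List.length_take]; omega
  · simp; omega

def reducer_step1_alt (invoice_no : String) (rows : List (String × String × Int)) : List (String × (String × Int)) :=
  let st := pvAgg rows
  [(st.1, (st.2.1, st.2.2))]

-- ===== PRECONDITION & SPEC =====
def Spec_reducer_step1 (invoice_no : String) (rows : List (String × String × Int)) (out : List (String × (String × Int))) : Prop := out = reducer_step1_alt invoice_no rows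
instance (invoice_no : String) (rows : List (String × String × Int)) (out : List (String × (String × Int))) : Decidable (Spec_reducer_step1 invoice_no rows out) := by unfold Spec_reducer_step1; infer_instance

-- ===== CLAIM (what is proved, stated in full; the proofs are below) =====
def Claim_equal_reducer_step1 : Prop := ∀ (invoice_no : String) (rows : List (String × String × Int)), Dom_reducer_step1 invoice_no rows → Spec_reducer_step1 invoice_no rows (reducer_step1 invoice_no rows)

-- ===== LEMMAS AND PROOFS =====
-- Characterisation of B's aggregation: last row's country/customer (or "") with the sum of quantities.
theorem pvAgg_eq (rs : List (String × String × Int)) :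
    pvAgg rs = (match rs.getLast? with
      | some r => (r.1, r.2.1, (rs.map (fun x => x.2.2)).sum)
      | none => ("", "", 0)) := by
  induction rs using pvAgg.induct with
  | case1 => simp [pvAgg]
  | case2 r => simp [pvAgg]
  | case3 a b tl mid ih1 ih2 =>
    rw [pvAgg]
    rw [ih1, ih2]
    have hmid : 1 ≤ mid ∧ mid ≤ tl.length + 1 := by
      simp only [mid, List.length_cons]; omega
    have hd : (a :: b :: tl).drop mid ≠ [] := by
      simp [List.drop_eq_nil_iff]; omega
    have hsplit : (a :: b :: tl).take mid ++ (a :: b :: tl).drop mid = a :: b :: tl :=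
      List.take_append_drop _ _
    have hlast : ((a :: b :: tl).drop mid).getLast? = (a :: b :: tl).getLast? := by
      conv_rhs => rw [← hsplit]
      rw [List.getLast?_append_of_ne_nil _ hd]
    rcases h : ((a :: b :: tl).drop mid).getLast? with _ | r
    · exact absurd (List.getLast?_eq_none_iff.mp h) hd
    · rw [hlast] at h
      rw [h]
      cases ht : ((a :: b :: tl).take mid).getLast? with
      | none =>
        exact absurd (List.getLast?_eq_none_iff.mp ht)
          (by simp [List.take_eq_nil_iff]; omega)
      | some s => simp [pvCombine]

-- A's fold invariant: final state = (last row's country, last row's id, init + sum of quantities).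
theorem foldA_last (rows : List (String × String × Int)) (c0 s0 : String) (t0 : Int)
    (h : rows ≠ []) :
    rows.foldl (fun (acc : String × String × Int) r => (r.1, r.2.1, acc.2.2 + r.2.2)) (c0, s0, t0)
      = ((rows.getLast h).1, (rows.getLast h).2.1, t0 + (rows.map (fun r => r.2.2)).sum) := by
  induction rows generalizing c0 s0 t0 with
  | nil => exact absurd rfl h
  | cons x xs ih =>
    cases xs with
    | nil => simp
    | cons y ys =>
      rw [List.foldl_cons]
      rw [ih x.1 x.2.1 (t0 + x.2.2) (by simp)]
      simp [List.getLast, add_assoc]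

-- ===== VERDICT (by name: the statement is the Claim_ definition above) =====
theorem reducer_step1_spec : Claim_equal_reducer_step1 := by
  intro invoice_no rows _
  unfold Spec_reducer_step1 reducer_step1 reducer_step1_alt
  rw [pvAgg_eq]
  cases h : rows with
  | nil => simp
  | cons x xs =>
    have hne : rows ≠ [] := by simp [h]
    rw [← h]
    rw [foldA_last rows "" "" 0 hne]
    rw [List.getLast?_eq_getLast_of_ne_nil hne]
    simp
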